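-- pv_equiv track=rewrite | github.com/YoruCathy/cs6120-tasks | lesson5/dominators.py | to_dot_dominator_tree
-- ===== SOURCE A (Python) =====
-- from typing import Dict, Set, List, Optional
--
-- def dominator_tree(idom: Dict[str, Optional[str]]) -> Dict[str, List[str]]:
--     tree: Dict[str, List[str]] = {n: [] for n in idom}
--     for n, p in idom.items():
--         if p is not None:
--             tree[p].append(n)
--     for k in tree:
--         tree[k].sort()
--     return tree
--
-- def to_dot_dominator_tree(idom: Dict[str, Optional[str]]) -> str:
--     tree = dominator_tree(idom)
--     lines = ["digraph DomTree {", "  rankdir=TB;", "  node [shape=ellipse];"]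
--     for p, kids in tree.items():
--         for c in kids:
--             lines.append(f'  "{p}" -> "{c}" [penwidth=2];')
--     lines.append("}")
--     return "\n".join(lines)
-- ===== SOURCE B (Python) =====
-- def to_dot_dominator_tree(idom):
--     order = {n: i for i, n in enumerate(idom)}
--     edges = sorted(((p, c) for c, p in idom.items() if p is not None),
--                    key=lambda e: (order[e[0]], e[1]))
--     lines = ["digraph DomTree {", "  rankdir=TB;", "  node [shape=ellipse];"]
--     lines += [f'  "{p}" -> "{c}" [penwidth=2];' for p, c in edges]
--     lines.append("}")
--     return "\n".join(lines)
-- ===== Notes on version B (the rewrite author's own statement) =====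
-- stated objective: simpler
-- what changed: Replaces the dominator_tree helper (a dict of child lists built in three passes and then walked) by a flat edge list sorted once by (parent position in idom, child name), emitted directly.
import Mathlib
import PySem

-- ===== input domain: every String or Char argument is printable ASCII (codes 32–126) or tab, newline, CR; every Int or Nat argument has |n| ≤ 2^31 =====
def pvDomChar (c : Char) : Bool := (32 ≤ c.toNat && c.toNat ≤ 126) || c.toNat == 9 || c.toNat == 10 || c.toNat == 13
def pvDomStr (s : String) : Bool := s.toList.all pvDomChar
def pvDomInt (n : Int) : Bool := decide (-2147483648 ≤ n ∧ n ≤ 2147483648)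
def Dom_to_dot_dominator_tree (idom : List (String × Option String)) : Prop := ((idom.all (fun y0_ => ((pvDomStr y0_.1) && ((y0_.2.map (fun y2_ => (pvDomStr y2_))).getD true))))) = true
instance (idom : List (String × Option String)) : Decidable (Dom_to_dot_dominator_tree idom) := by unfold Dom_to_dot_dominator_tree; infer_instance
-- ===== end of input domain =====

-- B replaces A's dominator_tree helper (dict of child lists built in three passes, then walked)
-- by a flat edge list sorted once by (parent position in idom, child name); same output, simpler shape.

-- the f-string '  "{p}" -> "{c}" [penwidth=2];' (identical in both Pythons)
def pvDotLine (p c : String) : String := "  \"" ++ p ++ "\" -> \"" ++ c ++ "\" [penwidth=2];"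

-- ===== PORT A =====
def dominator_tree (idom : List (String × Option String)) : PySem.Dict String (List String) :=
  let d := PySem.Dict.ofList idom
  -- tree = {n: [] for n in idom}
  let tree := d.keys.foldl (fun t n => t.insert n ([] : List String)) PySem.Dict.empty
  -- for n, p in idom.items(): if p is not None: tree[p].append(n)
  -- (tree[p].append raises KeyError when p is not a key: those inputs are outside Pre_)
  let tree := d.items.foldl (fun t np =>
      match np.2 with
      | some p => t.modify p [] (fun l => l ++ [np.1])
      | none => t) tree
  -- for k in tree: tree[k].sort()
  tree.keys.foldl (fun t k => t.insert k (PySem.List.sorted (t.getD k []) (fun x => x))) tree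

def to_dot_dominator_tree (idom : List (String × Option String)) : String :=
  let tree := dominator_tree idom
  let lines := ["digraph DomTree {", "  rankdir=TB;", "  node [shape=ellipse];"]
  let lines := tree.items.foldl (fun ls pk => pk.2.foldl (fun ls2 c => ls2 ++ [pvDotLine pk.1 c]) ls) lines
  PySem.Str.join "\n" (lines ++ ["}"])

-- ===== PORT B =====
def to_dot_dominator_tree_alt (idom : List (String × Option String)) : String :=
  let d := PySem.Dict.ofList idom
  -- order = {n: i for i, n in enumerate(idom)}
  let order := (PySem.List.enumerate d.keys).foldl
      (fun o p => o.insert p.2 p.1) (PySem.Dict.empty : PySem.Dict String Int)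
  -- edges = sorted(((p, c) for c, p in idom.items() if p is not None), key=lambda e: (order[e[0]], e[1]))
  -- (order[e[0]] raises KeyError when the parent is not a key — outside Pre_; the port reads getD with
  -- default 0 there, which is exact on every input admitted by Pre_)
  let edges := PySem.List.sorted2
      (d.items.filterMap (fun cp => cp.2.map (fun p => (p, cp.1))))
      (fun e => order.getD e.1 0) (fun e => e.2)
  PySem.Str.join "\n"
    (["digraph DomTree {", "  rankdir=TB;", "  node [shape=ellipse];"]
      ++ edges.map (fun e => pvDotLine e.1 e.2) ++ ["}"])

-- ===== PRECONDITION & SPEC =====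
-- Pre_ excludes exactly the inputs where Python A raises KeyError: a surviving dict entry whose
-- parent value is not a key of the dict (B raises KeyError on the same inputs).
def Pre_to_dot_dominator_tree (idom : List (String × Option String)) : Prop :=
  ∀ cp ∈ (PySem.Dict.ofList idom).items, ∀ q ∈ cp.2, (PySem.Dict.ofList idom).contains q = true
instance (idom : List (String × Option String)) : Decidable (Pre_to_dot_dominator_tree idom) := by
  unfold Pre_to_dot_dominator_tree; infer_instance

def pvWitness_to_dot_dominator_tree : (List (String × Option String)) :=
  [("a", none), ("b", some "a"), ("c", some "a")]

def Spec_to_dot_dominator_tree (idom : List (String × Option String)) (out : String) : Prop := out = to_dot_dominator_tree_alt idom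
instance (idom : List (String × Option String)) (out : String) : Decidable (Spec_to_dot_dominator_tree idom out) := by unfold Spec_to_dot_dominator_tree; infer_instance

-- ===== CLAIM (what is proved, stated in full; the proofs are below) =====
def Claim_equal_to_dot_dominator_tree : Prop := ∀ (idom : List (String × Option String)), Dom_to_dot_dominator_tree idom → Pre_to_dot_dominator_tree idom → Spec_to_dot_dominator_tree idom (to_dot_dominator_tree idom)

-- ===== LEMMAS AND PROOFS =====

-- children of k among the edges, in dict order
def pvChildren (l : List (String × String)) (k : String) : List String :=
  (l.filter (fun e => e.1 == k)).map (fun e => e.2)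

lemma pv_getD_foldl_insert_nil (K : List String) (t : PySem.Dict String (List String))
    (h : ∀ c, t.getD c [] = ([] : List String)) (c : String) :
    (K.foldl (fun t n => t.insert n ([] : List String)) t).getD c [] = [] := by
  induction K generalizing t with
  | nil => exact h c
  | cons a K ih =>
    refine ih _ (fun c => ?_)
    rw [PySem.Dict.getD_insert]
    split_ifs with hc
    · rfl
    · exact h c

lemma pv_foldl_modify_match (I : List (String × Option String)) (t : PySem.Dict String (List String)) :
    I.foldl (fun t np =>
      match np.2 with
      | some p => t.modify p [] (fun l => l ++ [np.1])
      | none => t) t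
    = (I.filterMap (fun cp => cp.2.map (fun p => (p, cp.1)))).foldl
        (fun t e => t.modify e.1 [] (fun l => l ++ [e.2])) t := by
  induction I generalizing t with
  | nil => rfl
  | cons a I ih =>
    rcases a with ⟨c, _ | p⟩ <;> simp [ih]

lemma pv_set_update_append (K s : List String) (hnd : K.Nodup) (hdis : ∀ x ∈ K, x ∉ s) :
    PySem.Set.update s K = s ++ K := by
  induction K generalizing s with
  | nil => simp [PySem.Set.update]
  | cons a K ih =>
    have ha : a ∉ s := hdis a (by simp)
    have : PySem.Set.add s a = s ++ [a] := by simp [PySem.Set.add, ha]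
    simp only [PySem.Set.update, List.foldl_cons] at *
    rw [this, ih (s ++ [a]) hnd.of_cons]
    · simp
    · intro x hx
      simp only [List.mem_append, List.mem_singleton]
      rintro (h | rfl)
      · exact hdis x (by simp [hx]) h
      · exact (List.nodup_cons.mp hnd).1 hx

lemma pv_set_update_self (K s : List String) (h : ∀ x ∈ K, x ∈ s) :
    PySem.Set.update s K = s := by
  induction K with
  | nil => simp [PySem.Set.update]
  | cons a K ih =>
    have ha : a ∈ s := h a (by simp)
    simp only [PySem.Set.update, List.foldl_cons] at *
    rw [show PySem.Set.add s a = s by simp [PySem.Set.add, ha]]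
    exact ih (fun x hx => h x (by simp [hx]))

lemma pv_getD_foldl_insert_of_not_mem (K : List String)
    (g : PySem.Dict String (List String) → String → List String)
    (t : PySem.Dict String (List String)) (k : String) (hk : k ∉ K) :
    (K.foldl (fun t x => t.insert x (g t x)) t).getD k [] = t.getD k [] := by
  induction K generalizing t with
  | nil => rfl
  | cons a K ih =>
    simp only [List.foldl_cons]
    rw [ih _ (fun h => hk (by simp [h]))]
    rw [PySem.Dict.getD_insert]
    simp only [List.mem_cons, not_or] at hk
    simp [hk.1]

lemma pv_getD_foldl_insert_sorted (K : List String) (hnd : K.Nodup)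
    (t : PySem.Dict String (List String)) (k : String) (hk : k ∈ K) :
    (K.foldl (fun t x => t.insert x (PySem.List.sorted (t.getD x []) (fun y => y))) t).getD k []
      = PySem.List.sorted (t.getD k []) (fun y => y) := by
  induction K generalizing t with
  | nil => simp at hk
  | cons a K ih =>
    simp only [List.foldl_cons]
    rcases List.mem_cons.mp hk with rfl | hk'
    · rw [pv_getD_foldl_insert_of_not_mem K _ _ k (List.nodup_cons.mp hnd).1]
      rw [PySem.Dict.getD_insert]; simp
    · rw [ih hnd.of_cons _ hk']
      have hne : k ≠ a := fun h => (List.nodup_cons.mp hnd).1 (h ▸ hk')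
      rw [PySem.Dict.getD_insert]; simp [hne]

lemma pv_order_getD (K : List String) (hnd : K.Nodup) (i : Nat) (hi : i < K.length) :
    ((PySem.List.enumerate K).foldl (fun o p => o.insert p.2 p.1)
      (PySem.Dict.empty : PySem.Dict String Int)).getD K[i] 0 = (i : Int) := by
  have hfresh : ∀ a ∈ PySem.List.enumerate K, (PySem.Dict.empty : PySem.Dict String Int).contains a.2 = false := by
    intro a _; simp [pysem]
  have hnodup : ((PySem.List.enumerate K).map (fun p => p.2)).Nodup := by
    rw [PySem.List.map_snd_enumerate]; exact hnd
  have hitems : (List.foldl (fun o p => o.insert p.2 p.1)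
      (PySem.Dict.empty : PySem.Dict String Int) (PySem.List.enumerate K)).items
      = List.map (fun a => (a.2, a.1)) (PySem.List.enumerate K) := by
    simpa using PySem.Dict.items_foldl_insert_fresh (PySem.List.enumerate K)
      (fun p => p.2) (fun p => p.1) PySem.Dict.empty hfresh hnodup
  have hkeys : ((PySem.List.enumerate K).foldl (fun o p => o.insert p.2 p.1)
      (PySem.Dict.empty : PySem.Dict String Int)).keys = K := by
    simp only [PySem.Dict.keys, hitems, List.map_map]
    simp [Function.comp_def, PySem.List.map_snd_enumerate]
  have hmem : (K[i], (i : Int)) ∈ ((PySem.List.enumerate K).foldl (fun o p => o.insert p.2 p.1)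
      (PySem.Dict.empty : PySem.Dict String Int)).items := by
    rw [hitems]
    refine List.mem_map.mpr ⟨((i : Int), K[i]), ?_, rfl⟩
    rw [PySem.List.mem_enumerate_iff]
    exact ⟨i, hi, by simp⟩
  exact PySem.Dict.getD_of_mem_items _ hmem (by rw [hkeys]; exact hnd) 0

lemma pv_sorted2_eq_sorted_lex {α : Type} (xs : List α) (k1 : α → Int) (k2 : α → String) :
    PySem.List.sorted2 xs k1 k2 = PySem.List.sorted xs (fun x => toLex (k1 x, k2 x)) := by
  have hcmp : ∀ a b : α,
      (decide (k1 a < k1 b) || (!decide (k1 b < k1 a) && decide (k2 a < k2 b)))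
        = decide (toLex (k1 a, k2 a) < toLex (k1 b, k2 b)) := by
    intro a b
    rcases lt_trichotomy (k1 a) (k1 b) with h | h | h
    · simp [h, Prod.Lex.lt_iff]
    · simp [h, Prod.Lex.lt_iff]
    · simp [h, Prod.Lex.lt_iff, not_lt_of_gt h, ne_of_gt h]
  rw [PySem.List.sorted_eq_foldl_insertBy]
  show List.foldl (fun acc x => PySem.List.insertBy
      (fun a b => decide (k1 a < k1 b) || (!decide (k1 b < k1 a) && decide (k2 a < k2 b))) x acc) [] xs = _
  simp only [hcmp]

def pvEdges (idom : List (String × Option String)) : List (String × String) :=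
  (PySem.Dict.ofList idom).items.filterMap (fun cp => cp.2.map (fun p => (p, cp.1)))

lemma pv_map_snd_edges_sublist (I : List (String × Option String)) :
    ((I.filterMap (fun cp => cp.2.map (fun p => (p, cp.1)))).map (fun e => e.2)).Sublist
      (I.map (fun cp => cp.1)) := by
  induction I with
  | nil => simp
  | cons a I ih =>
    rcases a with ⟨c, _ | p⟩
    · simp only [List.filterMap_cons]
      simpa using ih.cons c
    · simpa using ih.cons₂ c

lemma pv_edges_fst_mem (idom : List (String × Option String))
    (hPre : Pre_to_dot_dominator_tree idom) :
    ∀ e ∈ pvEdges idom, e.1 ∈ (PySem.Dict.ofList idom).keys := by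
  intro e he
  obtain ⟨cp, hcp, hmap⟩ := List.mem_filterMap.mp he
  rcases cp with ⟨c, _ | p⟩
  · simp at hmap
  · simp only [Option.map_some, Option.some.injEq] at hmap
    subst hmap
    exact (PySem.Dict.contains_iff_mem_keys _ _).mp (hPre (c, some p) hcp p rfl)

lemma pv_A_items (idom : List (String × Option String))
    (hPre : Pre_to_dot_dominator_tree idom) :
    (dominator_tree idom).items
      = (PySem.Dict.ofList idom).keys.map (fun k =>
          (k, PySem.List.sorted (pvChildren (pvEdges idom) k) (fun y => y))) := by
  have hndK : (PySem.Dict.ofList idom).keys.Nodup := PySem.Dict.nodup_keys_ofList idom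
  unfold dominator_tree
  dsimp only
  set d := PySem.Dict.ofList idom with hd
  set K := d.keys with hKdef
  set t0 := K.foldl (fun t n => t.insert n ([] : List String)) PySem.Dict.empty with ht0
  have ht0keys : t0.keys = K := by
    rw [ht0]
    have h := PySem.Dict.keys_foldl_insert K (fun _ _ => ([] : List String)) PySem.Dict.empty
    simp only [] at h
    rw [h, show (PySem.Dict.empty : PySem.Dict String (List String)).keys = [] from rfl,
      pv_set_update_append K [] hndK (by simp), List.nil_append]
  have ht0getD : ∀ c, t0.getD c [] = [] := by
    intro c
    exact pv_getD_foldl_insert_nil K _ (fun c => by simp [pysem]) c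
  rw [pv_foldl_modify_match d.items t0]
  rw [show List.filterMap (fun cp => Option.map (fun p => (p, cp.1)) cp.2) d.items
      = pvEdges idom from rfl]
  set t1 := (pvEdges idom).foldl (fun t e => t.modify e.1 [] (fun l => l ++ [e.2])) t0 with ht1
  have ht1getD : ∀ c, t1.getD c [] = pvChildren (pvEdges idom) c := by
    intro c
    rw [ht1, PySem.Dict.getD_foldl_modify_append, ht0getD, List.nil_append, pvChildren]
  have ht1keys : t1.keys = K := by
    rw [ht1]
    have h := PySem.Dict.keys_foldl_modify_key (pvEdges idom) (fun e => e.1)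
      ([] : List String) (fun _ e => fun l => l ++ [e.2]) t0
    simp only [] at h
    rw [h, ht0keys, pv_set_update_self _ _ ?_]
    intro x hx
    obtain ⟨e, he, rfl⟩ := List.mem_map.mp hx
    exact pv_edges_fst_mem idom hPre e he
  rw [ht1keys]
  set t2 := K.foldl (fun t k => t.insert k (PySem.List.sorted (t.getD k []) (fun x => x))) t1 with ht2
  have ht2keys : t2.keys = K := by
    rw [ht2]
    have h := PySem.Dict.keys_foldl_insert K
      (fun t k => PySem.List.sorted (t.getD k []) (fun x => x)) t1
    simp only [] at h
    rw [h, ht1keys, pv_set_update_self _ _ (fun x hx => hx)]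
  rw [PySem.Dict.items_eq_map_keys t2 (by rw [ht2keys]; exact hndK) [], ht2keys]
  refine List.map_congr_left ?_
  intro k hk
  rw [ht2, pv_getD_foldl_insert_sorted K hndK t1 k hk, ht1getD]

lemma pv_children_nodup (l : List (String × String)) (k : String)
    (hndl : (l.map (fun e => e.2)).Nodup) : (pvChildren l k).Nodup := by
  have hsub : (pvChildren l k).Sublist (l.map (fun e => e.2)) := by
    unfold pvChildren
    exact List.Sublist.map (f := fun e : String × String => e.2) (List.filter_sublist (p := fun e => e.1 == k) (l := l))
  exact hsub.nodup hndl

lemma pv_mem_children (l : List (String × String)) (k c : String) :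
    c ∈ pvChildren l k ↔ (k, c) ∈ l := by
  unfold pvChildren
  constructor
  · intro hc
    obtain ⟨e, he, rfl⟩ := List.mem_map.mp hc
    obtain ⟨hel, hek⟩ := List.mem_filter.mp he
    have : e.1 = k := by simpa using hek
    rw [show e = (e.1, e.2) from rfl, this] at hel
    exact hel
  · intro hc
    exact List.mem_map.mpr ⟨(k, c), List.mem_filter.mpr ⟨hc, by simp⟩, rfl⟩

lemma pv_sorted2_edges (l : List (String × String)) (K : List String) (f : String → Int)
    (hndl : (l.map (fun e => e.2)).Nodup)
    (hmem : ∀ e ∈ l, e.1 ∈ K)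
    (hK : K.Pairwise (fun a b => f a < f b)) :
    PySem.List.sorted2 l (fun e => f e.1) (fun e => e.2)
      = K.flatMap (fun k =>
          (PySem.List.sorted (pvChildren l k) (fun y => y)).map (fun c => (k, c))) := by
  rw [pv_sorted2_eq_sorted_lex]
  set ys := K.flatMap (fun k =>
      (PySem.List.sorted (pvChildren l k) (fun y => y)).map (fun c => (k, c))) with hys
  have hpw : ys.Pairwise (fun a b =>
      (toLex (f a.1, a.2) : Lex (Int × String)) < toLex (f b.1, b.2)) := by
    rw [hys, List.pairwise_flatMap]
    constructor
    · intro k _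
      rw [List.pairwise_map]
      have h1 := PySem.List.sorted_pairwise (pvChildren l k) (fun y => y)
      have h2 : (PySem.List.sorted (pvChildren l k) (fun y => y)).Nodup :=
        ((PySem.List.sorted_perm (pvChildren l k) (fun y => y) false).nodup_iff).mpr
          (pv_children_nodup l k hndl)
      refine (h1.and h2).imp ?_
      rintro a b ⟨hle, hne⟩
      rw [Prod.Lex.lt_iff]
      exact Or.inr ⟨rfl, lt_of_le_of_ne hle hne⟩
    · refine hK.imp ?_
      intro k1 k2 h x hx y hy
      obtain ⟨c1, _, rfl⟩ := List.mem_map.mp hx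
      obtain ⟨c2, _, rfl⟩ := List.mem_map.mp hy
      rw [Prod.Lex.lt_iff]
      exact Or.inl h
  have hndl' : l.Nodup := List.Nodup.of_map _ hndl
  have hndys : ys.Nodup := hpw.imp (fun h heq => absurd (heq ▸ h) (lt_irrefl _))
  have hperm : ys.Perm l := by
    rw [List.perm_ext_iff_of_nodup hndys hndl']
    intro e
    rw [hys, List.mem_flatMap]
    constructor
    · rintro ⟨k, _, he⟩
      obtain ⟨c, hc, rfl⟩ := List.mem_map.mp he
      rw [PySem.List.mem_sorted] at hc
      exact (pv_mem_children l k c).mp hc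
    · intro he
      refine ⟨e.1, hmem e he, List.mem_map.mpr ⟨e.2, ?_, rfl⟩⟩
      rw [PySem.List.mem_sorted, pv_mem_children]
      exact he
  exact PySem.List.sorted_eq_of_perm_of_pairwise_lt l ys (fun e => toLex (f e.1, e.2)) hperm hpw

lemma pv_main (idom : List (String × Option String))
    (hPre : Pre_to_dot_dominator_tree idom) :
    to_dot_dominator_tree idom = to_dot_dominator_tree_alt idom := by
  have hndK : (PySem.Dict.ofList idom).keys.Nodup := PySem.Dict.nodup_keys_ofList idom
  have hndl : ((pvEdges idom).map (fun e => e.2)).Nodup := by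
    have hsub := pv_map_snd_edges_sublist (PySem.Dict.ofList idom).items
    exact hsub.nodup hndK
  -- A side
  have hA : to_dot_dominator_tree idom
      = PySem.Str.join "\n"
          ((["digraph DomTree {", "  rankdir=TB;", "  node [shape=ellipse];"]
            ++ (PySem.Dict.ofList idom).keys.flatMap (fun k =>
                (PySem.List.sorted (pvChildren (pvEdges idom) k) (fun y => y)).map
                  (fun c => pvDotLine k c))) ++ ["}"]) := by
    unfold to_dot_dominator_tree
    dsimp only
    rw [pv_A_items idom hPre]
    simp only [PySem.List.foldl_append_singleton_eq_map, PySem.List.foldl_append_eq_flatMap,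
      List.flatMap_map]
  -- B side
  have hB : to_dot_dominator_tree_alt idom
      = PySem.Str.join "\n"
          (["digraph DomTree {", "  rankdir=TB;", "  node [shape=ellipse];"]
            ++ (PySem.Dict.ofList idom).keys.flatMap (fun k =>
                (PySem.List.sorted (pvChildren (pvEdges idom) k) (fun y => y)).map
                  (fun c => pvDotLine k c)) ++ ["}"]) := by
    unfold to_dot_dominator_tree_alt
    dsimp only
    rw [show List.filterMap (fun cp => Option.map (fun p => (p, cp.1)) cp.2)
        (PySem.Dict.ofList idom).items = pvEdges idom from rfl]
    have hKpw : (PySem.Dict.ofList idom).keys.Pairwise (fun a b =>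
        (((PySem.List.enumerate (PySem.Dict.ofList idom).keys).foldl
          (fun o p => o.insert p.2 p.1) (PySem.Dict.empty : PySem.Dict String Int)).getD a 0)
        < (((PySem.List.enumerate (PySem.Dict.ofList idom).keys).foldl
          (fun o p => o.insert p.2 p.1) (PySem.Dict.empty : PySem.Dict String Int)).getD b 0)) := by
      rw [List.pairwise_iff_getElem]
      intro i j hi hj hij
      rw [pv_order_getD _ hndK i hi, pv_order_getD _ hndK j hj]
      exact_mod_cast hij
    rw [pv_sorted2_edges (pvEdges idom) (PySem.Dict.ofList idom).keys _ hndl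
      (pv_edges_fst_mem idom hPre) hKpw]
    rw [List.map_flatMap]
    simp only [List.map_map, Function.comp_def]
  rw [hA, hB, List.append_assoc]

-- ===== VERDICT (by name: the statement is the Claim_ definition above) =====
theorem to_dot_dominator_tree_spec : Claim_equal_to_dot_dominator_tree := by
  intro idom _hDom hPre
  exact pv_main idom hPre
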